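-- pv_equiv track=rewrite | github.com/s7726/aoc2024 | day09/part1.py | move_files_to_empty_space
-- ===== SOURCE A (Python) =====
-- def move_files_to_empty_space(disk):
--     rdisk = [i for i in disk[::-1] if i != "."]
--     ndisk = ["."] * len(rdisk)
--     for i, item in enumerate(disk):
--         if item == ".":
--             try:
--                 ndisk[ndisk.index(".")] = rdisk.pop(0)
--             except IndexError:
--                 break
--         else:
--             try:
--                 ndisk[i] = item
--             except IndexError:
--                 break
--
--     ndisk.extend(["."] * (len(disk) - len(ndisk)))
--
--     return ndisk
-- ===== SOURCE B (Python) =====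
-- def move_files_to_empty_space(disk):
--     k = sum(1 for x in disk if x != ".")
--     movers = [x for x in disk[k:] if x != "."]
--     out = []
--     for x in disk[:k]:
--         if x == ".":
--             out.append(movers.pop())
--         else:
--             out.append(x)
--     out.extend(["."] * (len(disk) - k))
--     return out
-- ===== Notes on version B (the rewrite author's own statement) =====
-- stated objective: alternative
-- what changed: Replaces A's in-place simulation (a preallocated ndisk mutated via repeated ndisk.index('.') searches and rdisk.pop(0) front-pops with try/except control flow) by a counting pass: compute the compacted length k, collect the non-dot blocks of disk[k:], and build the output in one left-to-right pass over disk[:k], filling each gap with a pop from the end of that collection.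
import Mathlib
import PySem

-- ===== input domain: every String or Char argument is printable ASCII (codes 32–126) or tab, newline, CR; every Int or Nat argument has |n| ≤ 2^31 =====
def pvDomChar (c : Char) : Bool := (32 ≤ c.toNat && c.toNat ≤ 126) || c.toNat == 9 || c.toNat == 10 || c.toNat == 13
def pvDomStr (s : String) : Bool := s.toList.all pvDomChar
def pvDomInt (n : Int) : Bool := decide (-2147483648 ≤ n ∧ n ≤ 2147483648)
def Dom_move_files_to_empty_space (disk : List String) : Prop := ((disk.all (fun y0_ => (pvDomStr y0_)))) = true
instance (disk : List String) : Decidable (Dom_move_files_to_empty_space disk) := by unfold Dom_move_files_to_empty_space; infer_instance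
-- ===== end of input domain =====

-- B replaces A's in-place simulation (repeated ndisk.index(".") searches + rdisk.pop(0))
-- by a counting pass over disk[:k]; equivalence is proved on Pre_ (where Python A returns).

-- ===== PORT A =====
-- the for-loop of A over enumerate(disk), state = (ndisk, rdisk); i is the enumerate counter
def pvLoopA : List String → Nat → List String → List String → List String
  | [], _, nd, _ => nd
  | item :: rest, i, nd, rd =>
    if item == "." then
      -- rdisk.pop(0) is evaluated first; on [] it raises IndexError, caught → break
      match rd with
      | [] => nd
      | v :: rd' =>
        -- ndisk[ndisk.index(".")] = v ; index(".") raises ValueError when no "." remains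
        match PySem.List.index? nd "." with
        | some idx => pvLoopA rest (i+1) (nd.set idx v) rd'   -- idx in range, so List.set is exact
        | none => nd   -- Python raises ValueError here; such inputs are excluded by Pre_
    else
      -- ndisk[i] = item ; IndexError caught → break
      if i < nd.length then pvLoopA rest (i+1) (nd.set i item) rd
      else nd

def move_files_to_empty_space (disk : List String) : List String :=
  -- rdisk = [i for i in disk[::-1] if i != "."]  (disk[::-1] is reverse)
  let rdisk := disk.reverse.filter (fun i => i != ".")
  -- ndisk = ["."] * len(rdisk); then the loop
  let nd := pvLoopA disk 0 (List.replicate rdisk.length ".") rdisk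
  -- ndisk.extend(["."] * (len(disk) - len(ndisk)))
  nd ++ List.replicate (disk.length - nd.length) "."

-- ===== PORT B =====
-- the for-loop of Source B over disk[:k], taking movers from the end (movers.pop())
def pvFillB : List String → List String → List String
  | [], _ => []
  | x :: xs, movers =>
    if x == "." then
      match PySem.List.pop? movers with
      | none => []   -- movers.pop() on [] would raise IndexError; unreachable: len(movers) = dots in disk[:k]
      | some (v, ms) => v :: pvFillB xs ms
    else x :: pvFillB xs movers

def move_files_to_empty_space_alt (disk : List String) : List String :=
  let k := disk.countP (fun x => x != ".")
  let movers := (PySem.List.slice disk (some (k : Int)) none).filter (fun x => x != ".")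
  pvFillB (PySem.List.slice disk none (some (k : Int))) movers
    ++ List.replicate (disk.length - k) "."

-- ===== PRECONDITION & SPEC =====
-- Pre_ holds exactly where Python A returns: A raises an uncaught ValueError when the
-- block at index k (k = number of non-"." blocks) is "." while some earlier block is not.
def Pre_move_files_to_empty_space (disk : List String) : Prop :=
  let k := disk.countP (fun x => x != ".")
  disk.length ≤ k ∨ ¬ disk[k]? = some "." ∨ ∀ x ∈ disk.take k, x = "."
instance (disk : List String) : Decidable (Pre_move_files_to_empty_space disk) := by
  unfold Pre_move_files_to_empty_space; infer_instance
def pvWitness_move_files_to_empty_space : List String := ["0", ".", "1", "."]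

def Spec_move_files_to_empty_space (disk : List String) (out : List String) : Prop := out = move_files_to_empty_space_alt disk
instance (disk : List String) (out : List String) : Decidable (Spec_move_files_to_empty_space disk out) := by unfold Spec_move_files_to_empty_space; infer_instance

-- ===== CLAIM (what is proved, stated in full; the proofs are below) =====
def Claim_equal_move_files_to_empty_space : Prop := ∀ (disk : List String), Dom_move_files_to_empty_space disk → Pre_move_files_to_empty_space disk → Spec_move_files_to_empty_space disk (move_files_to_empty_space disk)
-- ===== LEMMAS AND PROOFS =====

-- abstract form of A's loop once the "filled prefix" invariant is in place
def pvRun : List String → List String → Nat → List String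
  | [], _, m => List.replicate m "."
  | x :: rest, rd, m =>
    if x == "." then
      match rd with
      | [] => List.replicate m "."
      | v :: rd' => if m = 0 then [] else v :: pvRun rest rd' (m - 1)
    else
      if m = 0 then [] else x :: pvRun rest rd (m - 1)

-- front-consuming form of B's loop (mv listed back-to-front); proof helper
def pvFillF : List String → List String → List String
  | [], _ => []
  | x :: xs, mv =>
    if x == "." then
      match mv with
      | [] => []
      | v :: ms => v :: pvFillF xs ms
    else x :: pvFillF xs mv

lemma pvFillB_eq_pvFillF : ∀ (xs mv : List String), pvFillB xs mv = pvFillF xs mv.reverse := by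
  intro xs
  induction xs with
  | nil => intro mv; rfl
  | cons x xs ih =>
    intro mv
    by_cases hx : (x == ".") = true
    · simp only [pvFillB, pvFillF, if_pos hx]
      rcases mv.eq_nil_or_concat with rfl | ⟨ms, v, rfl⟩
      · rfl
      · rw [List.concat_eq_append, PySem.List.pop?_last]
        simp only [List.reverse_append, List.reverse_cons, List.reverse_nil, List.nil_append,
          List.cons_append]
        rw [ih]
    · simp only [pvFillB, pvFillF, if_neg hx]
      rw [ih]

lemma pvIndex_prefix (p : List String) (m : Nat) (hp : ∀ x ∈ p, (x == ".") = false) :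
    PySem.List.index? (p ++ List.replicate m ".") "." =
      if m = 0 then none else some p.length := by
  cases m with
  | zero =>
    rw [if_pos rfl, PySem.List.index?_eq_none_iff]
    intro h
    simp only [List.replicate_zero, List.append_nil] at h
    have := hp _ h
    simp at this
  | succ m =>
    rw [if_neg (Nat.succ_ne_zero m), PySem.List.index?_eq_some_iff]
    exact ⟨p, List.replicate m ".", by simp [List.replicate_succ], rfl, by
      intro h; have := hp _ h; simp at this⟩

lemma pvSet_prefix (p : List String) (m : Nat) (v : String) (hm : m ≠ 0) :
    (p ++ List.replicate m ".").set p.length v = (p ++ [v]) ++ List.replicate (m - 1) "." := by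
  cases m with
  | zero => exact absurd rfl hm
  | succ m =>
    rw [List.replicate_succ]
    rw [List.set_append_right _ _ (Nat.le_refl _)]
    simp

lemma pvLoopA_length : ∀ (rest : List String) (i : Nat) (nd rd : List String),
    (pvLoopA rest i nd rd).length = nd.length := by
  intro rest
  induction rest with
  | nil => intro i nd rd; rfl
  | cons x rest ih =>
    intro i nd rd
    simp only [pvLoopA]
    split
    · match rd with
      | [] => rfl
      | v :: rd' =>
        simp only
        split
        · rw [ih]; simp
        · rfl
    · split
      · rw [ih]; simp
      · rfl

lemma pvLoopA_run : ∀ (rest p rd : List String) (m : Nat),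
    (∀ x ∈ p, (x == ".") = false) → (∀ x ∈ rd, (x == ".") = false) →
    pvLoopA rest p.length (p ++ List.replicate m ".") rd = p ++ pvRun rest rd m := by
  intro rest
  induction rest with
  | nil => intro p rd m hp hrd; rfl
  | cons x rest ih =>
    intro p rd m hp hrd
    simp only [pvLoopA, pvRun]
    by_cases hx : (x == ".") = true
    · simp only [if_pos hx]
      match rd with
      | [] => rfl
      | v :: rd' =>
        simp only
        rw [pvIndex_prefix p m hp]
        cases m with
        | zero => simp
        | succ m =>
          simp only [if_neg (Nat.succ_ne_zero m)]
          rw [pvSet_prefix p (m+1) v (Nat.succ_ne_zero m)]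
          have hlen : p.length + 1 = (p ++ [v]).length := by simp
          rw [hlen, Nat.succ_sub_one]
          rw [ih (p ++ [v]) rd' m ?_ ?_]
          · simp
          · intro y hy
            rcases List.mem_append.mp hy with h | h
            · exact hp _ h
            · simp only [List.mem_singleton] at h
              subst h; exact hrd _ List.mem_cons_self
          · intro y hy; exact hrd _ (List.mem_cons_of_mem _ hy)
    · simp only [if_neg hx]
      have hlen : (p ++ List.replicate m ".").length = p.length + m := by simp
      cases m with
      | zero =>
        rw [hlen]
        simp
      | succ m =>
        rw [hlen]
        simp only [if_pos (by omega : p.length < p.length + (m+1)), if_neg (Nat.succ_ne_zero m)]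
        rw [pvSet_prefix p (m+1) x (Nat.succ_ne_zero m)]
        have hl2 : p.length + 1 = (p ++ [x]).length := by simp
        rw [hl2, Nat.succ_sub_one]
        rw [ih (p ++ [x]) rd m ?_ hrd]
        · simp
        · intro y hy
          rcases List.mem_append.mp hy with h | h
          · exact hp _ h
          · simp only [List.mem_singleton] at h
            subst h
            simpa using hx

lemma pvRun_zero : ∀ (rest rd : List String), pvRun rest rd 0 = [] := by
  intro rest rd
  cases rest with
  | nil => rfl
  | cons x rest =>
    simp only [pvRun]
    by_cases hx : (x == ".") = true
    · simp only [if_pos hx]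
      match rd with
      | [] => rfl
      | v :: rd' => simp
    · simp only [if_neg hx]
      rfl

lemma pvRun_fill : ∀ (pre rest mv R : List String),
    pre.countP (fun x => x == ".") = mv.length →
    pvRun (pre ++ rest) (mv ++ R) pre.length = pvFillF pre mv ++ pvRun rest R 0 := by
  intro pre
  induction pre with
  | nil =>
    intro rest mv R hc
    simp only [List.countP_nil] at hc
    have hmv : mv = [] := List.eq_nil_of_length_eq_zero hc.symm
    subst hmv
    simp [pvFillF]
  | cons x pre ih =>
    intro rest mv R hc
    rw [List.countP_cons] at hc
    simp only [List.cons_append, pvRun, pvFillF, List.length_cons]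
    by_cases hx : (x == ".") = true
    · rw [if_pos hx] at hc
      simp only [if_pos hx]
      match mv with
      | [] => simp at hc
      | v :: mv' =>
        simp only [List.cons_append, List.length_cons] at hc ⊢
        rw [if_neg (Nat.succ_ne_zero pre.length), Nat.add_sub_cancel]
        rw [ih rest mv' R (by omega)]
    · rw [if_neg hx] at hc
      simp only [if_neg hx]
      rw [if_neg (Nat.succ_ne_zero pre.length), Nat.add_sub_cancel]
      rw [ih rest mv R (by omega)]
      simp

lemma pvCountP_not_eq (l : List String) :
    l.countP (fun x => x == ".") + l.countP (fun x => x != ".") = l.length := by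
  induction l with
  | nil => rfl
  | cons x l ih =>
    cases hbeq : x == "." with
    | false =>
      have h2 : (x != ".") = true := by simp [bne, hbeq]
      simp [hbeq, h2]
      omega
    | true =>
      have h2 : (x != ".") = false := by simp [bne, hbeq]
      simp [hbeq, h2]
      omega

-- ===== VERDICT (by name: the statement is the Claim_ definition above) =====
theorem move_files_to_empty_space_spec : Claim_equal_move_files_to_empty_space := by
  intro disk _ _
  unfold Spec_move_files_to_empty_space move_files_to_empty_space move_files_to_empty_space_alt
  -- the two ports agree on every input (on inputs outside Pre_, Python A raises;
  -- there the port's ValueError branch happens to return the same value)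
  set f : String → Bool := fun x => x != "." with hf
  have hk : (disk.reverse.filter f).length = disk.countP f := by
    rw [List.filter_reverse, List.length_reverse, List.countP_eq_length_filter]
  set k : Nat := disk.countP f with hkdef
  have hkle : k ≤ disk.length := by
    rw [hkdef, List.countP_eq_length_filter]
    exact List.length_filter_le _ _
  have hsplit : disk = disk.take k ++ disk.drop k := (List.take_append_drop k disk).symm
  have hrd : disk.reverse.filter f =
      ((disk.drop k).reverse.filter f) ++ ((disk.take k).reverse.filter f) := by
    conv_lhs => rw [hsplit]
    rw [List.reverse_append, List.filter_append]
  -- length bookkeeping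
  have hlen1 : (pvLoopA disk 0 (List.replicate (disk.reverse.filter f).length ".")
      (disk.reverse.filter f)).length = k := by
    rw [pvLoopA_length, List.length_replicate, hk]
  -- rewrite A's loop via the invariant
  have hmain : pvLoopA disk 0 (List.replicate (disk.reverse.filter f).length ".")
      (disk.reverse.filter f)
      = pvFillF (disk.take k) ((disk.drop k).reverse.filter f) := by
    have h0 : pvLoopA disk 0 (List.replicate (disk.reverse.filter f).length ".")
        (disk.reverse.filter f)
        = pvLoopA disk ([] : List String).length
          (([] : List String) ++ List.replicate k ".") (disk.reverse.filter f) := by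
      rw [hk]; rfl
    rw [h0, pvLoopA_run disk [] (disk.reverse.filter f) k (by simp) ?hnd]
    case hnd =>
      intro x hx
      have := List.of_mem_filter hx
      simpa [hf, bne] using this
    rw [List.nil_append]
    have hcount : (disk.take k).countP (fun x => x == ".") =
        ((disk.drop k).reverse.filter f).length := by
      have h1 : ((disk.drop k).reverse.filter f).length = (disk.drop k).countP f := by
        rw [List.filter_reverse, List.length_reverse, List.countP_eq_length_filter]
      have h2 : (disk.take k).countP f + (disk.drop k).countP f = k := by
        rw [← List.countP_append, List.take_append_drop, ← hkdef]
      have h3 := pvCountP_not_eq (disk.take k)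
      rw [← hf] at h3
      have h4 : (disk.take k).length = k := by rw [List.length_take]; omega
      rw [h1]; omega
    calc pvRun disk (disk.reverse.filter f) k
        = pvRun (disk.take k ++ disk.drop k)
            (((disk.drop k).reverse.filter f) ++ ((disk.take k).reverse.filter f))
            ((disk.take k).length) := by
          rw [List.take_append_drop, ← hrd, List.length_take]
          congr 1
          omega
      _ = pvFillF (disk.take k) ((disk.drop k).reverse.filter f)
            ++ pvRun (disk.drop k) ((disk.take k).reverse.filter f) 0 :=
          pvRun_fill _ _ _ _ hcount
      _ = pvFillF (disk.take k) ((disk.drop k).reverse.filter f) := by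
          rw [pvRun_zero]; simp
  have hlen2 : (pvFillF (disk.take k) ((disk.drop k).reverse.filter f)).length = k := by
    rw [← hmain]; exact hlen1
  simp only [hmain, hlen2]
  -- align B's slices with take/drop, and its end-popping loop with the front-consuming form
  rw [PySem.List.slice_to_natCast, PySem.List.slice_from_natCast]
  rw [pvFillB_eq_pvFillF, ← List.filter_reverse]
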